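-- pv_equiv track=rewrite | github.com/lordblendi/py-intelligens-rendszerfelugyelet-hazi | getSensorData.py | split_xmls
-- ===== SOURCE A (Python) =====
-- def split_xmls(message):
--     msg_list = []
--     line_list = []
--     for line in message.split('\n'):
--         if line.startswith('<?xml'):
--             if line_list:
--                 msg_list.append('\n'.join(line_list))
--             line_list = []
--         if line:
--             line_list.append(line)
--     if line_list:
--         msg_list.append('\n'.join(line_list))
--     return msg_list
-- ===== SOURCE B (Python) =====
-- def _rec(ls):
--     if not ls:
--         return []
--     i = 1
--     while i < len(ls) and not ls[i].startswith('<?xml'):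
--         i += 1
--     return ['\n'.join(ls[:i])] + _rec(ls[i:])
--
--
-- def split_xmls(message):
--     lines = [l for l in message.split('\n') if l]
--     return _rec(lines)
-- ===== Notes on version B (the rewrite author's own statement) =====
-- stated objective: alternative
-- what changed: Replaces the stateful accumulate-and-flush loop with a two-phase approach: filter out empty lines once, then recursively take each document as a maximal span ending before the next '<?xml' line.
import Mathlib
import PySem

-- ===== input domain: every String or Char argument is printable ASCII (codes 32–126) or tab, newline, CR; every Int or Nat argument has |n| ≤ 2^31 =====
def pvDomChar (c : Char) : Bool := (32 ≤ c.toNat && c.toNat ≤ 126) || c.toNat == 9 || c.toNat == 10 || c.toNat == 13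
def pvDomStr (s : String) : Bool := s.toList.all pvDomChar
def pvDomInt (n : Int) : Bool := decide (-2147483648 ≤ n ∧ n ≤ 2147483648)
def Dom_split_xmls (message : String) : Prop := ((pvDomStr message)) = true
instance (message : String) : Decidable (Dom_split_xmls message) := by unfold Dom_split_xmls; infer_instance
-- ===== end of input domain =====

-- B replaces A's accumulate-and-flush loop by filtering empty lines once and then
-- recursively cutting maximal spans before each subsequent '<?xml' line (alternative, same cost).

-- ===== PORT A =====
-- loop body of A: flush the accumulated lines on a '<?xml' line, then append nonempty lines
def splitXmlsStep (st : List String × List String) (line : String) : List String × List String :=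
  let st1 :=
    if PySem.Str.startswith line "<?xml" then
      (if st.2 ≠ [] then st.1 ++ [PySem.Str.join "\n" st.2] else st.1, ([] : List String))
    else st
  if line ≠ "" then (st1.1, st1.2 ++ [line]) else st1

def split_xmls (message : String) : List String :=
  let lines := (PySem.Str.split? message "\n").getD []
  let st := lines.foldl splitXmlsStep ([], [])
  if st.2 ≠ [] then st.1 ++ [PySem.Str.join "\n" st.2] else st.1

-- ===== PORT B =====
-- recursive helper of B: first line plus following non-'<?xml' lines form one document
def splitXmlsRec (ls : List String) : List String :=
  match ls with
  | [] => []
  | h :: t =>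
    PySem.Str.join "\n" (h :: t.takeWhile (fun l => !PySem.Str.startswith l "<?xml"))
      :: splitXmlsRec (t.dropWhile (fun l => !PySem.Str.startswith l "<?xml"))
termination_by ls.length
decreasing_by
  simpa using Nat.lt_succ_of_le (List.length_dropWhile_le _ _)

def split_xmls_alt (message : String) : List String :=
  splitXmlsRec (((PySem.Str.split? message "\n").getD []).filter (fun l => l ≠ ""))

-- ===== PRECONDITION & SPEC =====
def Spec_split_xmls (message : String) (out : List String) : Prop := out = split_xmls_alt message
instance (message : String) (out : List String) : Decidable (Spec_split_xmls message out) := by unfold Spec_split_xmls; infer_instance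

-- ===== CLAIM (what is proved, stated in full; the proofs are below) =====
def Claim_equal_split_xmls : Prop := ∀ (message : String), Dom_split_xmls message → Spec_split_xmls message (split_xmls message)

-- ===== LEMMAS AND PROOFS =====

-- the post-loop flush of A
def splitXmlsFinish (st : List String × List String) : List String :=
  if st.2 ≠ [] then st.1 ++ [PySem.Str.join "\n" st.2] else st.1

-- empty lines are no-ops for A's loop body
lemma step_empty (st : List String × List String) : splitXmlsStep st "" = st := by
  simp [splitXmlsStep,
    show PySem.Chars.startswith ([] : List Char) ['<', '?', 'x', 'm', 'l'] = false from by decide]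

-- A's fold ignores empty lines
lemma foldl_filter (ls : List String) (st : List String × List String) :
    ls.foldl splitXmlsStep st = (ls.filter (fun l => l ≠ "")).foldl splitXmlsStep st := by
  induction ls generalizing st with
  | nil => rfl
  | cons h t ih =>
    by_cases hh : h = ""
    · subst hh
      simpa [step_empty] using ih st
    · simp [List.filter, hh, ih]

-- what continuing the loop from state (msgs, cur) yields, in B's terms
def contFrom (cur : List String) (ls : List String) : List String :=
  if cur = [] then splitXmlsRec ls
  else
    PySem.Str.join "\n" (cur ++ ls.takeWhile (fun l => !PySem.Str.startswith l "<?xml"))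
      :: splitXmlsRec (ls.dropWhile (fun l => !PySem.Str.startswith l "<?xml"))

-- main loop invariant: over nonempty lines, A's flushing fold computes B's spans
lemma loop_spec (ls : List String) (hne : ∀ l ∈ ls, l ≠ "") (msgs cur : List String) :
    splitXmlsFinish (ls.foldl splitXmlsStep (msgs, cur)) = msgs ++ contFrom cur ls := by
  induction ls generalizing msgs cur with
  | nil =>
    by_cases hc : cur = [] <;>
      simp [splitXmlsFinish, contFrom, hc, splitXmlsRec]
  | cons h t ih =>
    have hh : h ≠ "" := hne h (by simp)
    have ht : ∀ l ∈ t, l ≠ "" := fun l hl => hne l (by simp [hl])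
    by_cases hx : PySem.Chars.startswith h.toList ['<', '?', 'x', 'm', 'l'] = true
    · by_cases hc : cur = []
      · subst hc
        rw [List.foldl_cons,
          show splitXmlsStep (msgs, ([] : List String)) h = (msgs, [h]) from by
            simp [splitXmlsStep, hx, hh]]
        rw [ih ht]
        simp [contFrom, splitXmlsRec]
      · rw [List.foldl_cons,
          show splitXmlsStep (msgs, cur) h = (msgs ++ [PySem.Str.join "\n" cur], [h]) from by
            simp [splitXmlsStep, hx, hc, hh]]
        rw [ih ht]
        simp [contFrom, hc, hx, splitXmlsRec, List.append_assoc]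
    · rw [List.foldl_cons,
        show splitXmlsStep (msgs, cur) h = (msgs, cur ++ [h]) from by
          simp [splitXmlsStep, hx, hh]]
      rw [ih ht]
      by_cases hc : cur = [] <;>
        simp [contFrom, hc, hx, splitXmlsRec]

-- ===== VERDICT (by name: the statement is the Claim_ definition above) =====
theorem split_xmls_spec : Claim_equal_split_xmls := by
  intro message _
  show split_xmls message = split_xmls_alt message
  have e : split_xmls message
      = splitXmlsFinish (((PySem.Str.split? message "\n").getD []).foldl splitXmlsStep ([], [])) := rfl
  rw [e, foldl_filter,
    loop_spec _ (fun l hl => of_decide_eq_true (List.mem_filter.mp hl).2) [] []]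
  simp [contFrom, split_xmls_alt]
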